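-- pv_equiv track=rewrite | github.com/sguzikowski/is210-week-07-synthesizing | task_01.py | get_matches
-- ===== SOURCE A (Python) =====
-- def get_matches(players):
--     """Matches players together
--
--     Args:
--         players (list): List of player names
--
--     Returns:
--         List of tuples which contain player pairs
--
--     Examples"
--
--         >>> get_matches(['Harry', 'Howard', 'Hugh'])
--         [('Harry', 'Howard'), ('Harry', 'Hugh'), ('Howard', 'Hugh')]
--     """
--
--     player_index = 0 #
--     names = []
--     while player_index < (len(players)-1): #all the way through
--         player = players[player_index]
--         player_index2 = player_index + 1 #wrong variable before [player_index]
--         player_index = player_index + 1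
--         while player_index2 < len(players): #2nd one forward
--             player2 = players[player_index2]
--             player_index2 = player_index2 + 1
--             somenames = (player, player2)
--             names.append(somenames)
--     return names
-- ===== SOURCE B (Python) =====
-- def get_matches(players):
--     """Matches players together: head/tail recursion with an accumulator."""
--     def go(rest, out):
--         if len(rest) <= 1:
--             return out
--         head, tail = rest[0], rest[1:]
--         out.extend((head, p) for p in tail)
--         return go(tail, out)
--     return go(players, [])
-- ===== Notes on version B (the rewrite author's own statement) =====
-- stated objective: simpler
-- what changed: Replaced the two hand-maintained nested while-loop indices with head/tail recursion carrying an accumulator: pair the head with every later player, then recurse on the tail.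
import Mathlib
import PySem

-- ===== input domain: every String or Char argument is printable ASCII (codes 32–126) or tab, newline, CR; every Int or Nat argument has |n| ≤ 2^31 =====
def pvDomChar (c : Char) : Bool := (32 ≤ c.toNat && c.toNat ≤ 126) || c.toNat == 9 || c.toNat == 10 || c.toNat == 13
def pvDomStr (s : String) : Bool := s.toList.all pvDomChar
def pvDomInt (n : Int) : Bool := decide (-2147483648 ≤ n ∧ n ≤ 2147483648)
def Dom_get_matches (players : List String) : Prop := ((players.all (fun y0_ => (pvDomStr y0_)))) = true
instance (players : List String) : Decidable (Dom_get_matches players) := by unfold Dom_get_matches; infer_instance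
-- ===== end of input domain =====

-- B replaces A's two nested index-driven while loops with head/tail recursion (simpler decomposition; same return value).


-- ===== PORT A =====
-- inner while: player_index2 advances to len(players), appending (player, players[player_index2])
def getMatchesInner (players : List String) (player : String) (j : Nat)
    (acc : List (String × String)) : List (String × String) :=
  if h : j < players.length then
    getMatchesInner players player (j + 1) (acc ++ [(player, players[j])])
  else acc
termination_by players.length - j

-- outer while: player_index < len(players) - 1 (for a Nat index i this is i + 1 < len,
-- exactly Python's i < len - 1 since indices are nonnegative)
def getMatchesOuter (players : List String) (i : Nat)
    (acc : List (String × String)) : List (String × String) :=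
  if h : i + 1 < players.length then
    getMatchesOuter players (i + 1) (getMatchesInner players players[i] (i + 1) acc)
  else acc
termination_by players.length - i

def get_matches (players : List String) : List (String × String) :=
  getMatchesOuter players 0 []

-- ===== PORT B =====
-- go(rest, out): if len(rest) <= 1 return out; extend out with (head, p) for p in tail, recurse on tail
def getMatchesGo : List String → List (String × String) → List (String × String)
  | [], out => out
  | [_], out => out
  | head :: tail, out => getMatchesGo tail (out ++ tail.map (fun p => (head, p)))

def get_matches_alt (players : List String) : List (String × String) :=
  getMatchesGo players []

-- ===== PRECONDITION & SPEC =====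
def Spec_get_matches (players : List String) (out : List (String × String)) : Prop := out = get_matches_alt players
instance (players : List String) (out : List (String × String)) : Decidable (Spec_get_matches players out) := by unfold Spec_get_matches; infer_instance

-- ===== CLAIM (what is proved, stated in full; the proofs are below) =====
def Claim_equal_get_matches : Prop := ∀ (players : List String), Dom_get_matches players → Spec_get_matches players (get_matches players)

-- ===== LEMMAS AND PROOFS =====
lemma go_cons (head : String) (tail : List String) (out : List (String × String)) :
    getMatchesGo (head :: tail) out = getMatchesGo tail (out ++ tail.map (fun p => (head, p))) := by
  cases tail <;> simp [getMatchesGo]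

lemma go_short (l : List String) (out : List (String × String)) (h : l.length ≤ 1) :
    getMatchesGo l out = out := by
  match l, h with
  | [], _ => rfl
  | [_], _ => rfl

lemma inner_eq (n : Nat) (players : List String) (player : String) (j : Nat)
    (acc : List (String × String)) (hn : players.length - j = n) :
    getMatchesInner players player j acc
      = acc ++ (players.drop j).map (fun r => (player, r)) := by
  induction n generalizing j acc with
  | zero =>
    rw [getMatchesInner, dif_neg (by omega), List.drop_eq_nil_of_le (by omega)]
    simp
  | succ n ih =>
    rw [getMatchesInner]
    by_cases h : j < players.length
    · rw [dif_pos h, ih (j + 1) _ (by omega), List.drop_eq_getElem_cons h, List.map_cons]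
      simp
    · rw [dif_neg h, List.drop_eq_nil_of_le (by omega)]
      simp

lemma outer_eq (n : Nat) (players : List String) (i : Nat)
    (acc : List (String × String)) (hn : players.length - i = n) :
    getMatchesOuter players i acc = getMatchesGo (players.drop i) acc := by
  induction n generalizing i acc with
  | zero =>
    rw [getMatchesOuter, dif_neg (by omega),
      go_short _ _ (by simp; omega)]
  | succ n ih =>
    rw [getMatchesOuter]
    by_cases h : i + 1 < players.length
    · rw [dif_pos h, ih (i + 1) _ (by omega),
        inner_eq (players.length - (i + 1)) _ _ _ _ rfl,
        List.drop_eq_getElem_cons (by omega : i < players.length), go_cons]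
    · rw [dif_neg h, go_short _ _ (by simp; omega)]

-- ===== VERDICT (by name: the statement is the Claim_ definition above) =====
theorem get_matches_spec : Claim_equal_get_matches := by
  intro players _
  unfold Spec_get_matches get_matches get_matches_alt
  exact outer_eq players.length players 0 [] (by omega)
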